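-- pv_equiv track=rewrite | github.com/diggledoot/leetcode_python | skilledd_interview_coding_quiz_which_i_flunked.py | lowest_price
-- ===== SOURCE A (Python) =====
-- def lowest_price(prices):
--     result = {}
--
--     for product, time, price in prices:
--         if product not in result:
--             result[product] = []
--         result[product].append([time, price])
--
--     for product in result:
--         temp = result[product]
--         time = None
--         price = None
--         for key, value in temp:
--             if price == None:
--                 time = key
--                 price = value
--                 continue
--             if price > value:
--                 time = key
--                 price = value
--         result[product].clear()
--         result[product].append([time, price])
--
--     return result
-- ===== SOURCE B (Python) =====
-- def lowest_price(prices):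
--     result = {}
--     for product, time, price in prices:
--         best = result.get(product)
--         if best is None or best[0][1] > price:
--             result[product] = [[time, price]]
--     return result
-- ===== Notes on version B (the rewrite author's own statement) =====
-- stated objective: simpler
-- what changed: Single pass keeping only the running-minimum [[time, price]] per product in the dict, instead of grouping all entries per product and then rescanning each group with None-sentinel state.
import Mathlib
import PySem

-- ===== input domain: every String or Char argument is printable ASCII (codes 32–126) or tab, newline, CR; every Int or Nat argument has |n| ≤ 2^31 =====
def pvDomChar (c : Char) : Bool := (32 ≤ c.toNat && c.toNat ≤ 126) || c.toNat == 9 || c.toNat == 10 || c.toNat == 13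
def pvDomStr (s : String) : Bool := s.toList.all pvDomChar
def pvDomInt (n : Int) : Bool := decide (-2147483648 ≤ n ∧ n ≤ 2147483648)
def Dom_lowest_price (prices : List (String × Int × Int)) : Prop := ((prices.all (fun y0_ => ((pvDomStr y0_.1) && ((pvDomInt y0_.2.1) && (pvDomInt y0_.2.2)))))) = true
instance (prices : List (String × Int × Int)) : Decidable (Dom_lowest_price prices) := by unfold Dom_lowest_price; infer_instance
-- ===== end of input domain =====

-- B replaces A's group-everything-then-rescan structure by a single pass that keeps only
-- the running minimum [[time, price]] per product (objective: simpler, same asymptotics).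

-- ===== PORT A =====
-- A's inner `for key, value in temp` loop body (time/price held as Option Int for Python's None).
def pvStepMin (tp : Option Int × Option Int) (kv : List Int) : Option Int × Option Int :=
  match kv with
  | [key, value] =>
    match tp.2 with
    | none => (some key, some value)
    | some price => if price > value then (some key, some value) else tp
  | _ => tp   -- unreachable: every stored entry is a 2-list [time, price] built by the first loop
def pvMinScan (temp : List (List Int)) : Option Int × Option Int :=
  temp.foldl pvStepMin (none, none)
-- the replacement value A writes back: `result[product].clear(); result[product].append([time, price])`
-- (.getD 0 is unreachable: temp is never empty, so the scan always ends with some/some)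
def pvFin (v : List (List Int)) : List (List Int) :=
  [[(pvMinScan v).1.getD 0, (pvMinScan v).2.getD 0]]
-- first loop's body: ensure the key exists, then append [time, price]
def pvStepA (d : PySem.Dict String (List (List Int))) (x : String × Int × Int) :
    PySem.Dict String (List (List Int)) :=
  let d := if d.contains x.1 then d else d.insert x.1 ([] : List (List Int))
  d.insert x.1 (d.getD x.1 [] ++ [[x.2.1, x.2.2]])
-- second loop's body
def pvStepA2 (d : PySem.Dict String (List (List Int))) (product : String) :
    PySem.Dict String (List (List Int)) :=
  d.insert product (pvFin (d.getD product []))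

def lowest_price (prices : List (String × Int × Int)) : List (String × List (List Int)) :=
  let d := prices.foldl pvStepA PySem.Dict.empty
  (d.keys.foldl pvStepA2 d).items

-- ===== PORT B =====
-- B's loop body: `best = result.get(product); if best is None or best[0][1] > price: result[product] = [[time, price]]`
def pvStepB (d : PySem.Dict String (List (List Int))) (x : String × Int × Int) :
    PySem.Dict String (List (List Int)) :=
  match d.get? x.1 with
  | none => d.insert x.1 [[x.2.1, x.2.2]]
  | some best =>
    match best with
    | [_t0, p0] :: _ =>
      if p0 > x.2.2 then d.insert x.1 [[x.2.1, x.2.2]] else d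
    | _ => d   -- unreachable: every stored value has the shape [[time, price]]

def lowest_price_alt (prices : List (String × Int × Int)) : List (String × List (List Int)) :=
  (prices.foldl pvStepB PySem.Dict.empty).items

-- ===== PRECONDITION & SPEC =====
def Spec_lowest_price (prices : List (String × Int × Int)) (out : List (String × List (List Int))) : Prop := out = lowest_price_alt prices
instance (prices : List (String × Int × Int)) (out : List (String × List (List Int))) : Decidable (Spec_lowest_price prices out) := by unfold Spec_lowest_price; infer_instance

-- ===== CLAIM (what is proved, stated in full; the proofs are below) =====
def Claim_equal_lowest_price : Prop := ∀ (prices : List (String × Int × Int)), Dom_lowest_price prices → Spec_lowest_price prices (lowest_price prices)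


-- ===== LEMMAS AND PROOFS =====

-- the per-item transformation B's dict applies to A's grouped dict
def pvF (q : String × List (List Int)) : String × List (List Int) := (q.1, pvFin q.2)

-- invariant relating A's grouping dict and B's running-minimum dict during the pass over prices
def pvRel (dA dB : PySem.Dict String (List (List Int))) : Prop :=
  dA.keys.Nodup ∧
  (∀ v ∈ dA.values, ∃ t p, pvMinScan v = (some t, some p)) ∧
  dB.items = dA.items.map pvF

theorem pvGet?_map (l : List (String × List (List Int))) (k : String) :
    (PySem.Dict.mk (l.map pvF)).get? k
      = ((PySem.Dict.mk l : PySem.Dict String (List (List Int))).get? k).map pvFin := by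
  induction l with
  | nil => rfl
  | cons q rest ih =>
    obtain ⟨kq, vq⟩ := q
    simp only [List.map_cons, pvF, PySem.Dict.get?_mk_cons]
    by_cases h : (kq == k) = true
    · simp [h]
    · simp [h, ih]

theorem pvRel_get? {dA dB : PySem.Dict String (List (List Int))}
    (h : dB.items = dA.items.map pvF) (k : String) :
    dB.get? k = (dA.get? k).map pvFin := by
  have hB : dB = PySem.Dict.mk (dA.items.map pvF) := PySem.Dict.ext h
  rw [hB]
  exact pvGet?_map dA.items k

theorem pvMinScan_append (v : List (List Int)) (t p : Int) :
    pvMinScan (v ++ [[t, p]]) =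
      (match (pvMinScan v).2 with
       | none => (some t, some p)
       | some p0 => if p0 > p then (some t, some p) else pvMinScan v) := by
  unfold pvMinScan
  rw [List.foldl_append]
  rfl

theorem pvRel_step {dA dB : PySem.Dict String (List (List Int))} (h : pvRel dA dB)
    (x : String × Int × Int) : pvRel (pvStepA dA x) (pvStepB dB x) := by
  obtain ⟨hnd, hvals, hitems⟩ := h
  obtain ⟨k, t, p⟩ := x
  by_cases hc : dA.contains k = true
  · -- key already present in A's dict
    obtain ⟨v, hget⟩ : ∃ v, dA.get? k = some v := by
      have := PySem.Dict.contains_eq_isSome_get? dA k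
      rw [hc] at this
      exact Option.isSome_iff_exists.mp this.symm
    have hgetD : dA.getD k [] = v := PySem.Dict.getD_of_get?_eq_some dA [] hget
    have hvmem : v ∈ dA.values := by
      have hmem := PySem.Dict.mem_items_of_get?_eq_some dA hget
      exact List.mem_map_of_mem hmem
    obtain ⟨t0, p0, hm⟩ := hvals v hvmem
    have hfin : pvFin v = [[t0, p0]] := by simp [pvFin, hm]
    have hBget : dB.get? k = some [[t0, p0]] := by
      rw [pvRel_get? hitems k, hget, Option.map_some, hfin]
    have hBc : dB.contains k = true := by
      rw [PySem.Dict.contains_eq_isSome_get?, hBget]; rfl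
    have hA' : pvStepA dA (k, t, p) = dA.insert k (v ++ [[t, p]]) := by
      simp [pvStepA, hc, hgetD]
    have hms : pvMinScan (v ++ [[t, p]])
        = if p0 > p then (some t, some p) else (some t0, some p0) := by
      rw [pvMinScan_append, hm]
    have hB' : pvStepB dB (k, t, p)
        = if p0 > p then dB.insert k [[t, p]] else dB := by
      simp [pvStepB, hBget]
    refine ⟨?_, ?_, ?_⟩
    · rw [hA']; exact PySem.Dict.nodup_keys_insert dA k _ hnd
    · rw [hA']
      intro w hw
      rcases PySem.Dict.mem_values_insert dA k _ w hw with hwv | hwv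
      · subst hwv
        rw [hms]
        by_cases hgt : p0 > p <;> simp [hgt]
      · exact hvals w hwv
    · rw [hA', hB']
      by_cases hgt : p0 > p
      · simp only [if_pos hgt]
        rw [PySem.Dict.items_insert_of_contains dA _ hc,
            PySem.Dict.items_insert_of_contains dB _ hBc, hitems, List.map_map, List.map_map]
        apply List.map_congr_left
        intro q _
        by_cases hqk : (q.1 == k) = true
        · simp [Function.comp, pvF, hqk, pvFin, hms, if_pos hgt]
        · simp [Function.comp, pvF, hqk]
      · simp only [if_neg hgt]
        rw [PySem.Dict.items_insert_of_contains dA _ hc, List.map_map, hitems]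
        apply List.map_congr_left
        intro q hq
        by_cases hqk : (q.1 == k) = true
        · have hk1 : q.1 = k := by simpa using hqk
          have hq' : (k, q.2) ∈ dA.items := by rw [← hk1]; exact hq
          have hq2 : q.2 = v := by
            have := PySem.Dict.getD_of_mem_items dA hq' hnd []
            rw [hgetD] at this; exact this.symm
          have hfin' : pvFin (v ++ [[t, p]]) = [[t0, p0]] := by
            simp [pvFin, hms, if_neg hgt]
          simp [Function.comp, pvF, hfin', hk1, hq2, hfin]
        · simp [Function.comp, pvF, hqk]
  · -- fresh key
    have hcf : dA.contains k = false := by simpa using hc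
    have hAget : dA.get? k = none := (PySem.Dict.get?_eq_none_iff_contains dA k).mpr hcf
    have hBget : dB.get? k = none := by rw [pvRel_get? hitems k, hAget]; rfl
    have hBc : dB.contains k = false := (PySem.Dict.get?_eq_none_iff_contains dB k).mp hBget
    have hA' : pvStepA dA (k, t, p) = dA.insert k [[t, p]] := by
      simp [pvStepA, hcf, PySem.Dict.getD_insert_self, PySem.Dict.insert_insert_self]
    have hB' : pvStepB dB (k, t, p) = dB.insert k [[t, p]] := by
      simp [pvStepB, hBget]
    refine ⟨?_, ?_, ?_⟩
    · rw [hA']; exact PySem.Dict.nodup_keys_insert dA k _ hnd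
    · rw [hA']
      intro w hw
      rcases PySem.Dict.mem_values_insert dA k _ w hw with hwv | hwv
      · subst hwv; exact ⟨t, p, rfl⟩
      · exact hvals w hwv
    · rw [hA', hB', PySem.Dict.items_insert_of_not_contains dA _ hcf,
          PySem.Dict.items_insert_of_not_contains dB _ hBc, hitems, List.map_append]
      rfl

theorem pvRel_fold (prices : List (String × Int × Int)) :
    ∀ dA dB, pvRel dA dB → pvRel (prices.foldl pvStepA dA) (prices.foldl pvStepB dB) := by
  induction prices with
  | nil => intro dA dB h; exact h
  | cons x xs ih => intro dA dB h; exact ih _ _ (pvRel_step h x)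

theorem pvLoop2 (ks : List String) :
    ∀ (d : PySem.Dict String (List (List Int))), ks.Nodup → d.keys.Nodup →
      (∀ k ∈ ks, d.contains k = true) →
      (ks.foldl pvStepA2 d).items
        = d.items.map (fun q => if q.1 ∈ ks then (q.1, pvFin q.2) else q) := by
  induction ks with
  | nil => intro d _ _ _; simp
  | cons k ks ih =>
    intro d hnd hdnd hcon
    obtain ⟨hknotin, hksnd⟩ := List.nodup_cons.mp hnd
    have hck : d.contains k = true := hcon k (by simp)
    have hd'items : (pvStepA2 d k).items
        = d.items.map (fun q => if (q.1 == k) = true then (k, pvFin (d.getD k [])) else q) :=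
      PySem.Dict.items_insert_of_contains d _ hck
    have hd'keys : (pvStepA2 d k).keys = d.keys :=
      PySem.Dict.keys_insert_of_contains d _ hck
    have hd'nd : (pvStepA2 d k).keys.Nodup := by rw [hd'keys]; exact hdnd
    have hd'con : ∀ k' ∈ ks, (pvStepA2 d k).contains k' = true := by
      intro k' hk'
      rw [PySem.Dict.contains_iff_mem_keys, hd'keys,
          ← PySem.Dict.contains_iff_mem_keys]
      exact hcon k' (by simp [hk'])
    rw [List.foldl_cons, ih (pvStepA2 d k) hksnd hd'nd hd'con, hd'items, List.map_map]
    apply List.map_congr_left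
    intro q hq
    by_cases hqk : (q.1 == k) = true
    · have hk1 : q.1 = k := by simpa using hqk
      have hq' : (k, q.2) ∈ d.items := by rw [← hk1]; exact hq
      have hq2 : d.getD k [] = q.2 := PySem.Dict.getD_of_mem_items d hq' hdnd []
      simp [Function.comp, hknotin, hk1, hq2]
    · have hk1 : ¬ q.1 = k := by simpa using hqk
      simp [Function.comp, hqk, hk1]


-- ===== VERDICT (by name: the statement is the Claim_ definition above) =====
theorem lowest_price_spec : Claim_equal_lowest_price := by
  unfold Claim_equal_lowest_price
  intro prices _
  unfold Spec_lowest_price lowest_price lowest_price_alt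
  obtain ⟨hnd, hvals, hitems⟩ :=
    pvRel_fold prices PySem.Dict.empty PySem.Dict.empty
      ⟨PySem.Dict.nodup_keys_empty, by intro v hv; simp [PySem.Dict.empty, PySem.Dict.values] at hv, rfl⟩
  rw [pvLoop2 (prices.foldl pvStepA PySem.Dict.empty).keys _ hnd hnd
      (fun k hk => (PySem.Dict.contains_iff_mem_keys _ k).mpr hk), hitems]
  apply List.map_congr_left
  intro q hq
  have hk : q.1 ∈ (prices.foldl pvStepA PySem.Dict.empty).keys :=
    PySem.Dict.mem_keys_of_mem_items _ hq
  simp [hk, pvF]
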